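-- pv_equiv track=rewrite | github.com/tusaunyapat/CompProg | 0934.py | pattern2
-- ===== SOURCE A (Python) =====
-- def pattern2(nrows, ncols):
--     ans = []
--     for i in range(nrows):
--         run = []
--         for j in range(ncols):
--             run.append((i+1) + nrows*j)
--         ans.append(run)
--     return ans
-- ===== SOURCE B (Python) =====
-- def pattern2(nrows, ncols):
--     # No rows: nothing to build.
--     if nrows <= 0:
--         return []
--     # Build each column as one consecutive range(), then transpose by indexing.
--     cols = [list(range(j * nrows + 1, (j + 1) * nrows + 1)) for j in range(ncols)]
--     return [[col[i] for col in cols] for i in range(nrows)]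
-- ===== Notes on version B (the rewrite author's own statement) =====
-- stated objective: alternative
-- what changed: Instead of nested loops computing each cell with the closed form (i+1)+nrows*j, B builds each column as a single consecutive range() and then transposes by indexing, with no per-cell arithmetic.
import Mathlib
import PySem

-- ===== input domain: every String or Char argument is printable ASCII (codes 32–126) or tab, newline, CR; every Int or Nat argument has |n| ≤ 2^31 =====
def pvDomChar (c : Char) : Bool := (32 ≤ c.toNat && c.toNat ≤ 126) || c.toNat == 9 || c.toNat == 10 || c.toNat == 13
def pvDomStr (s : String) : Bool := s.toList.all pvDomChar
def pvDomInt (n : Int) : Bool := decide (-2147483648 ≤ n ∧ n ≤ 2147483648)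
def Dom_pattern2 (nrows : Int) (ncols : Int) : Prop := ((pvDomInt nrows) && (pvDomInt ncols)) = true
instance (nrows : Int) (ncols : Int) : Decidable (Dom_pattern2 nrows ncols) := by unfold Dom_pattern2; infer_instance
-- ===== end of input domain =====

-- B rebuilds the grid by a different decomposition (alternative, same cost): each column is one
-- consecutive range and the result is its transpose by indexing, instead of A's nested loops
-- computing every cell from the closed form (i+1)+nrows*j.

-- ===== PORT A =====
def pattern2 (nrows : Int) (ncols : Int) : List (List Int) :=
  (PySem.List.pyRange 0 nrows 1).foldl
    (fun ans i =>
      ans ++ [(PySem.List.pyRange 0 ncols 1).foldl (fun run j => run ++ [(i + 1) + nrows * j]) []])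
    []

-- ===== PORT B =====
-- col[i] is ported with pyGetD; exact here since 0 ≤ i < nrows = length of every column,
-- so Python's col[i] never raises.
def pattern2_alt (nrows : Int) (ncols : Int) : List (List Int) :=
  if nrows ≤ 0 then [] else
  let cols := (PySem.List.pyRange 0 ncols 1).map
    (fun j => PySem.List.pyRange (j * nrows + 1) ((j + 1) * nrows + 1) 1)
  (PySem.List.pyRange 0 nrows 1).map (fun i => cols.map (fun col => PySem.List.pyGetD col i 0))

-- ===== PRECONDITION & SPEC =====
def Spec_pattern2 (nrows : Int) (ncols : Int) (out : List (List Int)) : Prop := out = pattern2_alt nrows ncols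
instance (nrows : Int) (ncols : Int) (out : List (List Int)) : Decidable (Spec_pattern2 nrows ncols out) := by unfold Spec_pattern2; infer_instance

-- ===== CLAIM (what is proved, stated in full; the proofs are below) =====
def Claim_equal_pattern2 : Prop := ∀ (nrows : Int) (ncols : Int), Dom_pattern2 nrows ncols → Spec_pattern2 nrows ncols (pattern2 nrows ncols)

-- ===== LEMMAS AND PROOFS =====

-- ===== VERDICT (by name: the statement is the Claim_ definition above) =====
-- one column of B read at row i equals A's cell formula
lemma col_entry (nrows i j : Int) (hi0 : 0 ≤ i) (hi : i < nrows) :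
    PySem.List.pyGetD (PySem.List.pyRange (j * nrows + 1) ((j + 1) * nrows + 1) 1) i 0
      = (i + 1) + nrows * j := by
  have hmul : (j + 1) * nrows = j * nrows + nrows := by ring
  have hlen : i < ((PySem.List.pyRange (j * nrows + 1) ((j + 1) * nrows + 1) 1).length : Int) := by
    rw [PySem.List.length_pyRange_one]
    omega
  rw [PySem.List.pyGetD_eq_getElem _ 0 hi0 hlen, PySem.List.getElem_pyRange_one]
  have hcast : (i.toNat : Int) = i := Int.toNat_of_nonneg hi0
  rw [hcast]
  ring

theorem pattern2_spec : Claim_equal_pattern2 := by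
  intro nrows ncols _
  unfold Spec_pattern2 pattern2 pattern2_alt
  by_cases hr : nrows ≤ 0
  · simp [hr, PySem.List.pyRange_one_eq_nil (by omega : nrows ≤ 0)]
  simp only [if_neg hr]
  simp only [PySem.List.foldl_append_singleton_eq_map, List.nil_append, List.map_map]
  apply List.map_congr_left
  intro i hi
  have hi' := (PySem.List.mem_pyRange_one).1 hi
  apply List.map_congr_left
  intro j _
  simp only [Function.comp_apply]
  exact (col_entry nrows i j hi'.1 hi'.2).symm
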